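-- pv_equiv track=rewrite | github.com/AlgolCare/Problem-Solving | 임정우/1주차/[PRGMS] 42842.py | solution
-- ===== SOURCE A (Python) =====
-- def solution(brown, yellow):
--     answer = []
--     total = brown + yellow
--     for i in range(1, total + 1):
--         if total % i == 0:
--             y,x = i,total // i
--             if (y - 2) * (x - 2) == yellow:
--                 answer.append(x)
--                 answer.append(y)
--                 break
--     return answer
-- ===== SOURCE B (Python) =====
-- def _isqrt(n):
--     # binary search: invariant lo*lo <= n < hi*hi
--     lo, hi = 0, n + 1
--     while hi - lo > 1:
--         mid = (lo + hi) // 2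
--         if mid * mid <= n:
--             lo = mid
--         else:
--             hi = mid
--     return lo
--
--
-- def solution(brown, yellow):
--     total = brown + yellow
--     if total <= 0 or brown % 2 != 0:
--         return []
--     s = (brown + 4) // 2          # s = width + height of any solution
--     d = s * s - 4 * total         # discriminant of t^2 - s*t + total
--     if d < 0:
--         return []
--     r = _isqrt(d)
--     if r * r != d:
--         return []
--     y = (s - r) // 2              # smaller root = height
--     if y < 1:
--         return []
--     return [(s + r) // 2, y]
-- ===== Notes on version B (the rewrite author's own statement) =====
-- stated objective: faster
-- what changed: Replaces A's linear scan over all divisor candidates 1..brown+yellow with a direct algebraic solve: the two sides are the roots of t^2 - s*t + total with s=(brown+4)//2, found via a binary-search integer square root of the discriminant, with [] returned when brown is odd, the discriminant is negative or not a perfect square, or the smaller root is below 1.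
import Mathlib
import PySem

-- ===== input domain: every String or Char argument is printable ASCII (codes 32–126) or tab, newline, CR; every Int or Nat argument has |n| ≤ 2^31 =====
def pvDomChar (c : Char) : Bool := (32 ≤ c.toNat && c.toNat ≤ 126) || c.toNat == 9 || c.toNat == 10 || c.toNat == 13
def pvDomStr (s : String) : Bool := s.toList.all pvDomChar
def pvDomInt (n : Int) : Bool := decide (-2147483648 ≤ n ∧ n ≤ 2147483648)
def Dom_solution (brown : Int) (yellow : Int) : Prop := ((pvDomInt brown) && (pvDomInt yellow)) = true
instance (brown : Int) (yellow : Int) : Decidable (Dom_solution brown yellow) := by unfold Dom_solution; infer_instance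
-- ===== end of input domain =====

-- B replaces A's divisor-enumeration loop by solving t^2 - s*t + total = 0 directly
-- (integer sqrt of the discriminant by binary search); objective: faster.

-- ===== PORT A =====
-- the for-loop with break: first i in range(1, total+1) with total % i == 0 and (i-2)*(total//i-2) == yellow
def solLoopA (total yellow : Int) : List Int → List Int
  | [] => []
  | i :: rest =>
    if PySem.Int.mod total i = 0 then
      if (i - 2) * (PySem.Int.floordiv total i - 2) = yellow then
        [PySem.Int.floordiv total i, i]
      else solLoopA total yellow rest
    else solLoopA total yellow rest

def solution (brown : Int) (yellow : Int) : List Int :=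
  solLoopA (brown + yellow) yellow (PySem.List.pyRange 1 (brown + yellow + 1) 1)

-- ===== PORT B =====
-- _isqrt's while loop: binary search keeping lo*lo <= n < hi*hi
def pvIsqrtGo (n lo hi : Int) : Int :=
  if _h : 1 < hi - lo then
    if PySem.Int.floordiv (lo + hi) 2 * PySem.Int.floordiv (lo + hi) 2 ≤ n then
      pvIsqrtGo n (PySem.Int.floordiv (lo + hi) 2) hi
    else
      pvIsqrtGo n lo (PySem.Int.floordiv (lo + hi) 2)
  else lo
termination_by (hi - lo).toNat
decreasing_by
  all_goals
    have hm : PySem.Int.floordiv (lo + hi) 2 = (lo + hi) / 2 :=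
      PySem.Int.floordiv_eq_ediv_of_pos (by norm_num)
    omega

def pvIsqrt (n : Int) : Int := pvIsqrtGo n 0 (n + 1)

def solution_alt (brown : Int) (yellow : Int) : List Int :=
  let total := brown + yellow
  if total ≤ 0 ∨ ¬ PySem.Int.mod brown 2 = 0 then []
  else
    let s := PySem.Int.floordiv (brown + 4) 2
    let d := s * s - 4 * total
    if d < 0 then []
    else
      let r := pvIsqrt d
      if ¬ r * r = d then []
      else
        let y := PySem.Int.floordiv (s - r) 2
        if y < 1 then [] else [PySem.Int.floordiv (s + r) 2, y]

-- ===== PRECONDITION & SPEC =====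
def Spec_solution (brown : Int) (yellow : Int) (out : List Int) : Prop := out = solution_alt brown yellow
instance (brown : Int) (yellow : Int) (out : List Int) : Decidable (Spec_solution brown yellow out) := by unfold Spec_solution; infer_instance

-- ===== CLAIM (what is proved, stated in full; the proofs are below) =====
def Claim_equal_solution : Prop := ∀ (brown : Int) (yellow : Int), Dom_solution brown yellow → Spec_solution brown yellow (solution brown yellow)

-- ===== LEMMAS AND PROOFS =====

-- A's loop returns [] when no element satisfies the accepting condition
theorem solLoopA_none (t yl : Int) (l : List Int)
    (h : ∀ i ∈ l, ¬(PySem.Int.mod t i = 0 ∧ (i - 2) * (PySem.Int.floordiv t i - 2) = yl)) :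
    solLoopA t yl l = [] := by
  induction l with
  | nil => rfl
  | cons i rest ih =>
    have hi := h i (by simp)
    simp only [solLoopA]
    split_ifs with h1 h2
    · exact absurd ⟨h1, h2⟩ hi
    · exact ih (fun j hj => h j (by simp [hj]))
    · exact ih (fun j hj => h j (by simp [hj]))

-- A's loop returns at the first satisfying element
theorem solLoopA_found (t yl : Int) (l1 l2 : List Int) (i : Int)
    (h : ∀ j ∈ l1, ¬(PySem.Int.mod t j = 0 ∧ (j - 2) * (PySem.Int.floordiv t j - 2) = yl))
    (h1 : PySem.Int.mod t i = 0)
    (h2 : (i - 2) * (PySem.Int.floordiv t i - 2) = yl) :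
    solLoopA t yl (l1 ++ i :: l2) = [PySem.Int.floordiv t i, i] := by
  induction l1 with
  | nil => simp [solLoopA, h1, h2]
  | cons j rest ih =>
    have hj := h j (by simp)
    simp only [List.cons_append, solLoopA]
    split_ifs with hj1 hj2
    · exact absurd ⟨hj1, hj2⟩ hj
    · exact ih (fun k hk => h k (by simp [hk]))
    · exact ih (fun k hk => h k (by simp [hk]))

theorem pvIsqrtGo_spec (n lo hi : Int) (hlt : lo < hi) (h1 : lo * lo ≤ n) (h2 : n < hi * hi) :
    lo ≤ pvIsqrtGo n lo hi ∧
    pvIsqrtGo n lo hi * pvIsqrtGo n lo hi ≤ n ∧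
    n < (pvIsqrtGo n lo hi + 1) * (pvIsqrtGo n lo hi + 1) := by
  rw [pvIsqrtGo]
  have hm : PySem.Int.floordiv (lo + hi) 2 = (lo + hi) / 2 :=
    PySem.Int.floordiv_eq_ediv_of_pos (by norm_num)
  split_ifs with hgap hle
  · have hb : lo < PySem.Int.floordiv (lo + hi) 2 ∧ PySem.Int.floordiv (lo + hi) 2 < hi := by
      rw [hm]; omega
    have := pvIsqrtGo_spec n (PySem.Int.floordiv (lo + hi) 2) hi hb.2 hle h2
    exact ⟨le_trans hb.1.le this.1, this.2⟩
  · have hb : lo < PySem.Int.floordiv (lo + hi) 2 ∧ PySem.Int.floordiv (lo + hi) 2 < hi := by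
      rw [hm]; omega
    exact pvIsqrtGo_spec n lo (PySem.Int.floordiv (lo + hi) 2) hb.1 h1 (by omega)
  · have : hi = lo + 1 := by omega
    exact ⟨le_refl _, h1, by rw [← this]; exact h2⟩
termination_by (hi - lo).toNat
decreasing_by
  all_goals rw [hm]; omega

theorem pvIsqrt_spec (n : Int) (hn : 0 ≤ n) :
    0 ≤ pvIsqrt n ∧ pvIsqrt n * pvIsqrt n ≤ n ∧ n < (pvIsqrt n + 1) * (pvIsqrt n + 1) := by
  have h := pvIsqrtGo_spec n 0 (n + 1) (by omega) (by omega) (by nlinarith)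
  exact h

theorem pvIsqrt_unique (n r : Int) (hn : 0 ≤ n) (hr : 0 ≤ r) (h : r * r = n) : pvIsqrt n = r := by
  obtain ⟨h0, h1, h2⟩ := pvIsqrt_spec n hn
  have ha : pvIsqrt n ≤ r := by nlinarith
  have hb : r ≤ pvIsqrt n := by nlinarith
  omega

-- parity of a square
theorem sq_emod_two (a : Int) : a * a % 2 = a % 2 := by
  have h : a % 2 = 0 ∨ a % 2 = 1 := by omega
  rcases h with h | h
  · obtain ⟨q, hq⟩ : ∃ q, a = 2 * q := ⟨a / 2, by omega⟩
    subst hq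
    have : 2 * q * (2 * q) = 2 * (2 * q * q) := by ring
    omega
  · obtain ⟨q, hq⟩ : ∃ q, a = 2 * q + 1 := ⟨a / 2, by omega⟩
    subst hq
    have : (2 * q + 1) * (2 * q + 1) = 2 * (2 * q * q + 2 * q) + 1 := by ring
    omega

-- the accepting condition of A's loop, characterised algebraically (brown even, 2*s = brown+4)
theorem cond_iff (brown yl t s i : Int) (ht : t = brown + yl) (hs : 2 * s = brown + 4) (hi : 1 ≤ i) :
    (PySem.Int.mod t i = 0 ∧ (i - 2) * (PySem.Int.floordiv t i - 2) = yl) ↔ i * (s - i) = t := by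
  have hipos : (0 : Int) < i := hi
  have hmod : PySem.Int.mod t i = t % i := PySem.Int.mod_eq_emod_of_pos hipos
  have hfd : PySem.Int.floordiv t i = t / i := PySem.Int.floordiv_eq_ediv_of_pos hipos
  rw [hmod, hfd]
  constructor
  · rintro ⟨h1, h2⟩
    have hdvd : i ∣ t := Int.dvd_of_emod_eq_zero h1
    have hx : i * (t / i) = t := Int.mul_ediv_cancel' hdvd
    have hexp : (i - 2) * (t / i - 2) = i * (t / i) - 2 * i - 2 * (t / i) + 4 := by ring
    have hxval : t / i = s - i := by linarith
    rw [hxval] at hx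
    exact hx
  · intro hprod
    have hdvd : i ∣ t := ⟨s - i, hprod.symm⟩
    have h1 : t % i = 0 := Int.emod_eq_zero_of_dvd hdvd
    have hx : t / i = s - i := by
      rw [← hprod]
      exact Int.mul_ediv_cancel_left _ (by omega)
    refine ⟨h1, ?_⟩
    rw [hx]
    have hexp : (i - 2) * (s - i - 2) = i * (s - i) - 2 * s + 4 := by ring
    linarith

-- a root is within the loop's range and its partner is positive
theorem valid_bounds (t s i : Int) (ht0 : 0 < t) (hi : 1 ≤ i) (hp : i * (s - i) = t) :
    1 ≤ s - i ∧ i ≤ t := by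
  have h1 : 0 < s - i := by nlinarith
  constructor
  · omega
  · nlinarith

-- a satisfying i forces brown even
theorem cond_even (brown yl t i : Int) (ht : t = brown + yl) (hi : 1 ≤ i)
    (hc : PySem.Int.mod t i = 0 ∧ (i - 2) * (PySem.Int.floordiv t i - 2) = yl) :
    brown % 2 = 0 := by
  have hipos : (0 : Int) < i := hi
  have hmod : PySem.Int.mod t i = t % i := PySem.Int.mod_eq_emod_of_pos hipos
  have hfd : PySem.Int.floordiv t i = t / i := PySem.Int.floordiv_eq_ediv_of_pos hipos
  rw [hmod] at hc
  rw [hfd] at hc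
  have hdvd : i ∣ t := Int.dvd_of_emod_eq_zero hc.1
  have hx : i * (t / i) = t := Int.mul_ediv_cancel' hdvd
  have hexp : (i - 2) * (t / i - 2) = i * (t / i) - 2 * i - 2 * (t / i) + 4 := by ring
  have hbr : brown = 2 * (i + t / i) - 4 := by linarith [hc.2]
  omega

theorem solution_eq (brown yellow : Int) : solution brown yellow = solution_alt brown yellow := by
  unfold solution solution_alt
  by_cases ht : brown + yellow ≤ 0
  · rw [PySem.List.pyRange_one_eq_nil (by omega)]
    simp only [solLoopA]
    rw [if_pos (Or.inl ht)]
  · push_neg at ht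
    have hb2 : PySem.Int.mod brown 2 = brown % 2 := PySem.Int.mod_eq_emod_of_pos (by norm_num)
    by_cases hpar : brown % 2 = 0
    · -- brown even
      have hsfd : PySem.Int.floordiv (brown + 4) 2 = (brown + 4) / 2 :=
        PySem.Int.floordiv_eq_ediv_of_pos (by norm_num)
      set s : Int := (brown + 4) / 2 with hsdef
      have hs : 2 * s = brown + 4 := by omega
      set t : Int := brown + yellow with htdef
      set d : Int := s * s - 4 * t with hddef
      by_cases hex : ∃ i, 1 ≤ i ∧ i * (s - i) = t
      · obtain ⟨i0, hi0, hp0⟩ := hex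
        obtain ⟨hpart, _⟩ := valid_bounds t s i0 ht hi0 hp0
        have hroot : (2 * i0 - s) * (2 * i0 - s) = d := by linear_combination (-4 : Int) * hp0
        have hd0 : 0 ≤ d := by nlinarith [hroot]
        have habs : |2 * i0 - s| * |2 * i0 - s| = d := by
          rw [abs_mul_abs_self]; exact hroot
        have hr : pvIsqrt d = |2 * i0 - s| := pvIsqrt_unique d _ hd0 (abs_nonneg _) habs
        set r : Int := pvIsqrt d with hrdef
        have hrnn : 0 ≤ r := by rw [hr]; exact abs_nonneg _
        have hrr : r * r = d := by rw [hr]; exact habs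
        -- the two roots
        have hy2 : ∃ y, 2 * y = s - r ∧ 1 ≤ y ∧ y * (s - y) = t := by
          rcases abs_cases (2 * i0 - s) with ⟨he, _⟩ | ⟨he, _⟩
          · refine ⟨s - i0, by omega, by omega, by linear_combination hp0⟩
          · exact ⟨i0, by omega, hi0, hp0⟩
        obtain ⟨y, hy, hy1, hyp⟩ := hy2
        obtain ⟨hy2', hyt⟩ := valid_bounds t s y ht hy1 hyp
        have hx0 : 2 * (s - y) = s + r := by omega
        -- no satisfying j below y
        have hnone : ∀ j ∈ PySem.List.pyRange 1 y 1,
            ¬(PySem.Int.mod t j = 0 ∧ (j - 2) * (PySem.Int.floordiv t j - 2) = yellow) := by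
          intro j hj
          rw [PySem.List.mem_pyRange_one] at hj
          rw [cond_iff brown yellow t s j htdef hs hj.1]
          intro hpj
          have hrootj : (2 * j - s) * (2 * j - s) = d := by linear_combination (-4 : Int) * hpj
          have hfac : (2 * j - s - r) * (2 * j - s + r) = 0 := by linear_combination hrootj - hrr
          rcases mul_eq_zero.mp hfac with hz | hz
          · omega
          · omega
        rw [PySem.List.pyRange_one_append 1 y (t + 1) (by omega) (by omega),
          PySem.List.pyRange_one_cons (a := y) (b := t + 1) (by omega)]
        rw [solLoopA_found t yellow _ _ y hnone
          ((cond_iff brown yellow t s y htdef hs hy1).mpr hyp).1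
          ((cond_iff brown yellow t s y htdef hs hy1).mpr hyp).2]
        have hfdy : PySem.Int.floordiv t y = s - y := by
          rw [PySem.Int.floordiv_eq_ediv_of_pos (by omega : (0:Int) < y), ← hyp]
          exact Int.mul_ediv_cancel_left _ (by omega)
        -- B's branches
        rw [if_neg (by rw [hb2]; omega), hsfd]
        rw [if_neg (by omega : ¬ s * s - 4 * t < 0)]
        rw [if_neg (by simp [← hrdef, ← hddef, hrr])]
        have hfy : PySem.Int.floordiv (s - pvIsqrt (s * s - 4 * t)) 2 = y := by
          rw [← hddef, ← hrdef, PySem.Int.floordiv_eq_ediv_of_pos (by norm_num : (0:Int) < 2)]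
          omega
        rw [hfy, if_neg (by omega : ¬ y < 1)]
        have hfx : PySem.Int.floordiv (s + pvIsqrt (s * s - 4 * t)) 2 = s - y := by
          rw [← hddef, ← hrdef, PySem.Int.floordiv_eq_ediv_of_pos (by norm_num : (0:Int) < 2)]
          omega
        rw [hfdy, hfx]
      · -- no solution: A scans the whole range and finds nothing
        push_neg at hex
        rw [solLoopA_none t yellow _ (by
          intro i hi
          rw [PySem.List.mem_pyRange_one] at hi
          rw [cond_iff brown yellow t s i htdef hs hi.1]
          exact hex i hi.1)]
        rw [if_neg (by rw [hb2]; omega), hsfd]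
        by_cases hd : s * s - 4 * t < 0
        · rw [if_pos hd]
        · rw [if_neg hd]
          set r : Int := pvIsqrt (s * s - 4 * t) with hrdef
          by_cases hrr : r * r = s * s - 4 * t
          · rw [if_neg (by simp [hrr])]
            -- parity: r ≡ s (mod 2), so y = (s-r)/2 is exact; y ≥ 1 would contradict hex
            have hpar2 : r % 2 = s % 2 := by
              have h1 := sq_emod_two r
              have h2 := sq_emod_two s
              omega
            have hfy : PySem.Int.floordiv (s - r) 2 = (s - r) / 2 :=
              PySem.Int.floordiv_eq_ediv_of_pos (by norm_num)
            rw [hfy]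
            set y : Int := (s - r) / 2 with hydef
            have hy2 : 2 * y = s - r := by omega
            have h4 : 4 * (y * (s - y)) = 4 * t := by
              linear_combination (s + r - 2 * y) * hy2 - hrr
            have hyval : y * (s - y) = t := by linarith
            have : ¬ 1 ≤ y := fun h => hex y h hyval
            rw [if_pos (by omega)]
          · rw [if_pos (by simpa using hrr)]
    · -- brown odd: the condition never holds, and B bails out immediately
      rw [solLoopA_none (brown + yellow) yellow _ (by
        intro i hi
        rw [PySem.List.mem_pyRange_one] at hi
        exact fun hc => hpar (cond_even brown yellow (brown + yellow) i rfl hi.1 hc))]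
      rw [if_pos (Or.inr (by rw [hb2]; exact hpar))]

-- ===== VERDICT (by name: the statement is the Claim_ definition above) =====
theorem solution_spec : Claim_equal_solution := by
  intro brown yellow _
  unfold Spec_solution
  exact solution_eq brown yellow
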